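-- pv_equiv track=rewrite | github.com/noaakayad/Python-Programs | List Comprehensions 2.py | change_input_even_more
-- ===== SOURCE A (Python) =====
-- def change_input_even_more(strange_list):
--     """
--     ##############################################################
--     # Here I first check that 'strange_list' is a list, if so I
--     check if the elements of strange_list are strings.
--
--     Then I create a list of lists of int 'list_nums' that contains all the
--     updated digits by casting string to int and int to string
--     for each string from 'strange_list' by using a nested list comprehension
--     where I loop over the letters of each string from 'strange_list' and by
--     looping over the strings of 'strange_list'
--
--     Then I do the same with the letters in the list 'list_letters'
--
--     Thus I join all the char of each list in 'list_nums' and in 'list_letters'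
--
--     And thus, I return a list containing the sum of the elements of the 2 lists
--     at the same index beginning the sum with the elements of 'list_letters'#
--     ##############################################################
--
--     >>> change_input_even_more(["3.14IS PIE", "11My aGe iS"])
--     ['.IS PIE628', 'My AGE IS22']
--     >>> change_input_even_more(["go t6o sleep at ", \
--     "5i like to start work before "])
--     ['gO tO slEEp At 12', 'I lIkE tO stArt wOrk bEfOrE 10']
--     >>> change_input_even_more("11My aGe iS")
--     Traceback (most recent call last):
--     ...
--     AssertionError
--
--     >>> change_input_even_more(["T4ke t2o tabl3ts", "M0rning"])
--     ['TkE tO tAblts846', 'MrnIng0']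
--     >>> change_input_even_more(["123", "hello", "world5"])
--     ['246', 'hEllO', 'wOrld10']
--     >>> change_input_even_more(["n3xt l3v3l", "g4me"])
--     ['nxt lvl666', 'gmE8']
--     """
--     assert isinstance(strange_list, list)
--     assert all(isinstance(i, str) for i in strange_list)
--
--     time_2 = 2
--     list_nums = [[str(time_2*int(i)) for i in words if i.isdigit()]
--                  for words in strange_list]
--
--     list_letters = [[i.upper() if i in ['a','e','i','o','u']
--                      else i for i in words if not i.isdigit()]
--                     for words in strange_list]
--
--     list_nums = [''.join(nums) for nums in list_nums]
--
--     list_letters = [''.join(letters) for letters in list_letters]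
--
--     return [list_letters[i] + list_nums[i] for i in range(len(list_nums))]
-- ===== SOURCE B (Python) =====
-- def change_input_even_more(strange_list):
--     assert isinstance(strange_list, list)
--     assert all(isinstance(i, str) for i in strange_list)
--
--     vowels = {'a', 'e', 'i', 'o', 'u'}
--     result = []
--     for words in strange_list:
--         letters = []
--         nums = []
--         for c in words:
--             if c.isdigit():
--                 nums.append(str(2 * int(c)))
--             else:
--                 letters.append(c.upper() if c in vowels else c)
--         result.append(''.join(letters) + ''.join(nums))
--     return result
-- ===== Notes on version B (the rewrite author's own statement) =====
-- stated objective: simpler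
-- what changed: Replaces A's four separate passes per word (digit comprehension, letter comprehension, two joins, then an index-zip over range) by one single scan per word maintaining a letter accumulator and a number accumulator, appending their concatenation directly to the result.
import Mathlib
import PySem

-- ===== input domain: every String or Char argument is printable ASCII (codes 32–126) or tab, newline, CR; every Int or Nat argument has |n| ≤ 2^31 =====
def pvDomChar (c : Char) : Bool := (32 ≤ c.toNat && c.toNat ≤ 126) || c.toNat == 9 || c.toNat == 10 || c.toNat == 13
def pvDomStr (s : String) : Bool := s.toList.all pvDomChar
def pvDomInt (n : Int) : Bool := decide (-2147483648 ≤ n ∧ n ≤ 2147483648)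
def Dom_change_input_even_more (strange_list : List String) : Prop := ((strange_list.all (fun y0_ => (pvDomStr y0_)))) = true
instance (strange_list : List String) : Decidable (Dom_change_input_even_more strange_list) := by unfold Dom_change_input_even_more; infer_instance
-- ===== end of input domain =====

-- B fuses A's two comprehension passes, two joins and the index-zip into one scan per word (objective: simpler).

-- ===== PORT A =====
-- int(i) for a single char i that passed i.isdigit(): exact on ASCII digits '0'-'9'
def pvDigitVal (c : Char) : Int := (c.toNat : Int) - 48

def change_input_even_more (strange_list : List String) : List String :=
  -- time_2 = 2 is inlined as the literal 2
  let list_nums : List (List String) :=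
    strange_list.map (fun words =>
      (words.toList.filter (fun i => PySem.Chars.isdigit i)).map
        (fun i => PySem.Int.toStr (2 * pvDigitVal i)))
  let list_letters : List (List Char) :=
    strange_list.map (fun words =>
      (words.toList.filter (fun i => !PySem.Chars.isdigit i)).map
        (fun i => if i ∈ ['a','e','i','o','u'] then PySem.Chars.upperChar i else i))
  let list_nums2 : List String := list_nums.map (fun nums => PySem.Str.join "" nums)
  let list_letters2 : List String := list_letters.map (fun letters => String.mk letters)
  -- index i of range(len(list_nums)) is always in range, so the default "" is never used
  (PySem.List.pyRange 0 (list_nums2.length : Int) 1).map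
    (fun i => PySem.List.pyGetD list_letters2 i "" ++ PySem.List.pyGetD list_nums2 i "")

-- ===== PORT B =====
-- one scan per word: step folds each char into (letter accumulator, number accumulator)
def pvStep (acc : List Char × List String) (c : Char) : List Char × List String :=
  if PySem.Chars.isdigit c then
    (acc.1, acc.2 ++ [PySem.Int.toStr (2 * pvDigitVal c)])
  else
    (acc.1 ++ [if c ∈ ['a','e','i','o','u'] then PySem.Chars.upperChar c else c], acc.2)

def pvProcWord (words : String) : String :=
  let p := words.toList.foldl pvStep ([], [])
  String.mk p.1 ++ PySem.Str.join "" p.2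

def change_input_even_more_alt (strange_list : List String) : List String :=
  strange_list.foldl (fun result words => result ++ [pvProcWord words]) []

-- ===== PRECONDITION & SPEC =====
def Spec_change_input_even_more (strange_list : List String) (out : List String) : Prop := out = change_input_even_more_alt strange_list
instance (strange_list : List String) (out : List String) : Decidable (Spec_change_input_even_more strange_list out) := by unfold Spec_change_input_even_more; infer_instance

-- ===== CLAIM (what is proved, stated in full; the proofs are below) =====
def Claim_equal_change_input_even_more : Prop := ∀ (strange_list : List String), Dom_change_input_even_more strange_list → Spec_change_input_even_more strange_list (change_input_even_more strange_list)

-- ===== LEMMAS AND PROOFS =====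

theorem pvFoldl_step (cs : List Char) (lets : List Char) (nums : List String) :
    cs.foldl pvStep (lets, nums) =
      (lets ++ (cs.filter (fun i => !PySem.Chars.isdigit i)).map
          (fun i => if i ∈ ['a','e','i','o','u'] then PySem.Chars.upperChar i else i),
       nums ++ (cs.filter (fun i => PySem.Chars.isdigit i)).map
          (fun i => PySem.Int.toStr (2 * pvDigitVal i))) := by
  induction cs generalizing lets nums with
  | nil => simp
  | cons c cs ih =>
    by_cases h : PySem.Chars.isdigit c = true
    · simp [pvStep, h, ih, List.append_assoc]
    · simp only [Bool.not_eq_true] at h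
      simp [pvStep, h, ih, List.append_assoc]

theorem pvProcWord_eq (w : String) :
    pvProcWord w =
      String.mk ((w.toList.filter (fun i => !PySem.Chars.isdigit i)).map
          (fun i => if i ∈ ['a','e','i','o','u'] then PySem.Chars.upperChar i else i)) ++
      PySem.Str.join "" ((w.toList.filter (fun i => PySem.Chars.isdigit i)).map
          (fun i => PySem.Int.toStr (2 * pvDigitVal i))) := by
  simp [pvProcWord, pvFoldl_step]

theorem pvFoldl_append_map {α β : Type} (xs : List α) (f : α → β) (acc : List β) :
    xs.foldl (fun r x => r ++ [f x]) acc = acc ++ xs.map f := by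
  induction xs generalizing acc with
  | nil => simp
  | cons x xs ih => simp [ih]

theorem pvZip_lemma (xs : List String) (f g : String → String) :
    (PySem.List.pyRange 0 (((xs.map f).length : Int)) 1).map
        (fun i => PySem.List.pyGetD (xs.map g) i "" ++ PySem.List.pyGetD (xs.map f) i "") =
      xs.map (fun x => g x ++ f x) := by
  apply List.ext_getElem
  · simp [PySem.List.length_pyRange_one]
  · intro k h1 h2
    simp only [List.getElem_map, PySem.List.getElem_pyRange_one, List.length_map] at *
    have hk : k < xs.length := by
      simpa [PySem.List.length_pyRange_one] using h1
    rw [show ((0 : Int) + ((k : Nat) : Int)) = ((k : Nat) : Int) by ring]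
    simp [PySem.List.pyGetD_natCast, List.getD_eq_getElem?_getD, hk]

theorem change_input_even_more_eq (xs : List String) :
    change_input_even_more xs = change_input_even_more_alt xs := by
  unfold change_input_even_more change_input_even_more_alt
  simp only []
  rw [pvFoldl_append_map]
  simp only [List.nil_append, List.map_map]
  rw [pvZip_lemma]
  apply List.map_congr_left
  intro w _
  rw [pvProcWord_eq]
  rfl

-- ===== VERDICT (by name: the statement is the Claim_ definition above) =====
theorem change_input_even_more_spec : Claim_equal_change_input_even_more := by
  intro xs _
  unfold Spec_change_input_even_more
  exact change_input_even_more_eq xs
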